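-- pv_equiv track=rewrite | github.com/djkenada/Rumble-Upload | app/services/title_rewriter.py | _capitalize_word
-- ===== SOURCE A (Python) =====
-- def _capitalize_word(word: str) -> str:
--     """Convert an ALL CAPS word to title case while preserving punctuation."""
--     result = []
--     first_alpha = True
--     for ch in word:
--         if ch.isalpha():
--             if first_alpha:
--                 result.append(ch.upper())
--                 first_alpha = False
--             else:
--                 result.append(ch.lower())
--         else:
--             result.append(ch)
--     return "".join(result)
-- ===== SOURCE B (Python) =====
-- def _capitalize_word(word: str) -> str:
--     """Convert an ALL CAPS word to title case while preserving punctuation."""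
--     i = next((k for k, c in enumerate(word) if c.isalpha()), None)
--     if i is None:
--         return word
--     return word[:i] + word[i].upper() + word[i + 1:].lower()
-- ===== Notes on version B (the rewrite author's own statement) =====
-- stated objective: simpler
-- what changed: Replaces the per-character loop with a first_alpha flag and an accumulator list by a single find of the first alphabetic index followed by slicing: prefix kept, that char uppercased, the rest lowered with one str.lower() call.
import Mathlib
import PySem

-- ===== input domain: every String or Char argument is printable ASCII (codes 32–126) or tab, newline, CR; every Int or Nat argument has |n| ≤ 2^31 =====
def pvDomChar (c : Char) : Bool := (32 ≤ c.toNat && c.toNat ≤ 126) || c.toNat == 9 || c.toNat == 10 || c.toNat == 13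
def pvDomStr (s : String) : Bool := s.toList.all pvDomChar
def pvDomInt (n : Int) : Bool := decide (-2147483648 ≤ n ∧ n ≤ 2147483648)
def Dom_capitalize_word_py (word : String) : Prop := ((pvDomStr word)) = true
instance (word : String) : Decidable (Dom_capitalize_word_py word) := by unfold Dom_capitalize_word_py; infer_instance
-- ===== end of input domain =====

-- B replaces A's per-character loop with a first_alpha flag by find-first-alpha-index + slicing (simpler decomposition, same O(n) cost).

-- ===== PORT A =====
-- loop: result list + first_alpha flag, appended character by character
def capitalize_word_py (word : String) : String :=
  let st := word.toList.foldl
    (fun (st : List Char × Bool) ch =>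
      if PySem.Chars.isalpha ch then
        if st.2 then (st.1 ++ [PySem.Chars.upperChar ch], false)
        else (st.1 ++ [PySem.Chars.lowerChar ch], st.2)
      else (st.1 ++ [ch], st.2))
    ([], true)
  String.ofList st.1

-- ===== PORT B =====
-- Source B: i = index of first alphabetic char (None → return word unchanged);
-- else word[:i] + word[i].upper() + word[i+1:].lower().
-- word[i] is ported via pyGet?; the .getD ' ' default is never reached since findIdx? returned some i (i in range).
def capitalize_word_py_alt (word : String) : String :=
  let cs := word.toList
  match cs.findIdx? PySem.Chars.isalpha with
  | none => word
  | some i =>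
      String.ofList (PySem.List.slice cs none (some (i : Int))
        ++ [PySem.Chars.upperChar ((PySem.List.pyGet? cs (i : Int)).getD ' ')]
        ++ PySem.Chars.lower (PySem.List.slice cs (some ((i : Int) + 1)) none))

-- ===== PRECONDITION & SPEC =====
def Spec_capitalize_word_py (word : String) (out : String) : Prop := out = capitalize_word_py_alt word
instance (word : String) (out : String) : Decidable (Spec_capitalize_word_py word out) := by unfold Spec_capitalize_word_py; infer_instance

-- ===== CLAIM (what is proved, stated in full; the proofs are below) =====
def Claim_equal_capitalize_word_py : Prop := ∀ (word : String), Dom_capitalize_word_py word → Spec_capitalize_word_py word (capitalize_word_py word)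

-- ===== LEMMAS AND PROOFS =====

-- the common list-level meaning of both programs
def pvCapList : List Char → List Char
  | [] => []
  | c :: cs =>
      if PySem.Chars.isalpha c then PySem.Chars.upperChar c :: PySem.Chars.lower cs
      else c :: pvCapList cs

-- A's loop body as a named function
def pvStepA (st : List Char × Bool) (ch : Char) : List Char × Bool :=
  if PySem.Chars.isalpha ch then
    if st.2 then (st.1 ++ [PySem.Chars.upperChar ch], false)
    else (st.1 ++ [PySem.Chars.lowerChar ch], st.2)
  else (st.1 ++ [ch], st.2)

theorem pvLowerChar_of_not_alpha (c : Char) (h : PySem.Chars.isalpha c = false) :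
    PySem.Chars.lowerChar c = c := by
  simp [PySem.Chars.isalpha] at h
  simp [PySem.Chars.lowerChar, h.1]

theorem pvFoldA_false (cs : List Char) (acc : List Char) :
    (cs.foldl pvStepA (acc, false)).1 = acc ++ PySem.Chars.lower cs := by
  induction cs generalizing acc with
  | nil => simp [PySem.Chars.lower]
  | cons c cs ih =>
    by_cases h : PySem.Chars.isalpha c = true
    · simp [pvStepA, h, ih, PySem.Chars.lower]
    · simp only [Bool.not_eq_true] at h
      simp [pvStepA, h, ih, PySem.Chars.lower, pvLowerChar_of_not_alpha c h]

theorem pvFoldA_true (cs : List Char) (acc : List Char) :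
    (cs.foldl pvStepA (acc, true)).1 = acc ++ pvCapList cs := by
  induction cs generalizing acc with
  | nil => simp [pvCapList]
  | cons c cs ih =>
    by_cases h : PySem.Chars.isalpha c = true
    · simp [pvStepA, h, pvCapList, pvFoldA_false]
    · simp only [Bool.not_eq_true] at h
      simp [pvStepA, h, pvCapList, ih]

theorem pvA_eq (word : String) :
    capitalize_word_py word = String.ofList (pvCapList word.toList) := by
  have : (word.toList.foldl pvStepA ([], true)).1 = pvCapList word.toList := by
    simpa using pvFoldA_true word.toList []
  simpa [capitalize_word_py, pvStepA] using congrArg String.ofList this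

theorem pvCapList_eq_find (cs : List Char) :
    pvCapList cs =
      (match cs.findIdx? PySem.Chars.isalpha with
        | none => cs
        | some i =>
            PySem.List.slice cs none (some (i : Int))
              ++ [PySem.Chars.upperChar ((PySem.List.pyGet? cs (i : Int)).getD ' ')]
              ++ PySem.Chars.lower (PySem.List.slice cs (some ((i : Int) + 1)) none)) := by
  induction cs with
  | nil => simp [pvCapList]
  | cons c cs ih =>
    by_cases h : PySem.Chars.isalpha c = true
    · simp [pvCapList, h, List.findIdx?_cons, PySem.List.pyGet?, PySem.List.pyIdx?,
        PySem.List.slice_to, PySem.List.slice_from_one]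
    · simp only [Bool.not_eq_true] at h
      rw [pvCapList]
      simp only [h, Bool.false_eq_true, if_false]
      rw [List.findIdx?_cons]
      simp only [h, Bool.false_eq_true, if_false]
      cases hf : cs.findIdx? PySem.Chars.isalpha with
      | none => simp [ih, hf]
      | some i =>
        simp only [Option.map_some]
        rw [ih, hf]
        have f1 : PySem.List.slice cs none (some (i : Int)) = cs.take i := by
          rw [PySem.List.slice_to_natCast]
        have f2 : PySem.List.slice cs (some ((i : Int) + 1)) none = cs.drop (i + 1) := by
          rw [show ((i : Int) + 1) = ((i + 1 : Nat) : Int) by push_cast; ring,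
            PySem.List.slice_from_natCast]
        have e1 : PySem.List.slice (c :: cs) none (some ((i + 1 : Nat) : Int))
            = c :: cs.take i := by
          rw [PySem.List.slice_to_natCast]; rfl
        have e2 : PySem.List.slice (c :: cs) (some (((i + 1 : Nat) : Int) + 1)) none
            = cs.drop (i + 1) := by
          rw [show (((i + 1 : Nat) : Int) + 1) = ((i + 1 + 1 : Nat) : Int) by push_cast; ring,
            PySem.List.slice_from_natCast]
          rfl
        have e3 : (PySem.List.pyGet? (c :: cs) ((i + 1 : Nat) : Int)).getD ' '
            = (PySem.List.pyGet? cs (i : Int)).getD ' ' := by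
          simp [PySem.List.pyGet?_natCast]
        simp only [f1, f2, e1, e2, e3]
        simp

theorem pvB_eq (word : String) :
    capitalize_word_py_alt word = String.ofList (pvCapList word.toList) := by
  rw [capitalize_word_py_alt, pvCapList_eq_find]
  cases h : word.toList.findIdx? PySem.Chars.isalpha with
  | none => simp
  | some i => simp

-- ===== VERDICT (by name: the statement is the Claim_ definition above) =====
theorem capitalize_word_py_spec : Claim_equal_capitalize_word_py := by
  intro word _
  unfold Spec_capitalize_word_py
  rw [pvA_eq, pvB_eq]
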